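-- pv_equiv track=rewrite | github.com/jackhall/koan | scripts/migrate_type_sigil.py | _dict_brace_ranges
-- ===== SOURCE A (Python) =====
-- def _dict_brace_ranges(body: str) -> list[tuple[int, int]]:
--     """Find ranges (in `body`) of every Koan-source `{...}` dict literal so the colon-
--     triple rewrite can skip them. Balanced-brace scan that:
--     - ignores `{` / `}` after a `\\` (Rust escape).
--     - ignores `{` / `}` inside an embedded single-quoted or double-quoted *Koan*-source
--       string literal — Koan uses `'...'` and `"..."` for its own strings.
--     - tracks brace depth so nested dicts close properly.
--
--     Returns a list of `(start, end)` half-open intervals (`start` = position of `{`,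
--     `end` = position just past `}`). Used by `_rewrite_colons` to skip matches whose
--     span overlaps any dict-frame interval.
--     """
--     ranges: list[tuple[int, int]] = []
--     i = 0
--     depth = 0
--     starts: list[int] = []
--     in_kstr: str | None = None  # `'` or `"` if we're inside an embedded Koan string.
--     while i < len(body):
--         c = body[i]
--         if c == "\\" and i + 1 < len(body):
--             # Rust source escape — skip the escaped char so `\"` doesn't toggle in_kstr.
--             i += 2
--             continue
--         if in_kstr is not None:
--             if c == in_kstr:
--                 in_kstr = None
--             i += 1
--             continue
--         if c in ("'", '"'):
--             in_kstr = c
--             i += 1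
--             continue
--         if c == "{":
--             starts.append(i)
--             depth += 1
--         elif c == "}":
--             if starts:
--                 start = starts.pop()
--                 ranges.append((start, i + 1))
--             if depth > 0:
--                 depth -= 1
--         i += 1
--     return ranges
-- ===== SOURCE B (Python) =====
-- def _dict_brace_ranges(body: str) -> list[tuple[int, int]]:
--     """Recursive-descent version: each nesting level is a recursive call; the
--     call stack replaces the explicit list of open-brace positions."""
--     n = len(body)
--     out: list[tuple[int, int]] = []
--
--     def skip_string(i: int, quote: str) -> int:
--         """Return the index just past the closing quote (or n)."""
--         while i < n:
--             c = body[i]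
--             if c == "\\" and i + 1 < n:
--                 i += 2
--             elif c == quote:
--                 return i + 1
--             else:
--                 i += 1
--         return n
--
--     def parse(i: int) -> int:
--         """Scan one nesting level from i; return the index of the '}' closing
--         this level, or n if the input ends first. Completed inner ranges are
--         appended to `out` as their '}' is reached."""
--         while i < n:
--             c = body[i]
--             if c == "\\" and i + 1 < n:
--                 i += 2
--             elif c == "'" or c == '"':
--                 i = skip_string(i + 1, c)
--             elif c == "{":
--                 j = parse(i + 1)
--                 if j < n:
--                     out.append((i, j + 1))
--                 i = j + 1
--             elif c == "}":
--                 return i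
--             else:
--                 i += 1
--         return n
--
--     i = 0
--     while i < n:
--         i = parse(i) + 1  # a '}' returned at top level is unmatched: ignore it
--     return out
-- ===== Notes on version B (the rewrite author's own statement) =====
-- stated objective: alternative
-- what changed: B is a recursive-descent parser: each brace nesting level is one recursive call (plus a helper that skips a quoted string), so A's explicit stack of open-brace positions and its single interleaved state machine with depth/in_kstr variables disappear into the call structure.
import Mathlib
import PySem

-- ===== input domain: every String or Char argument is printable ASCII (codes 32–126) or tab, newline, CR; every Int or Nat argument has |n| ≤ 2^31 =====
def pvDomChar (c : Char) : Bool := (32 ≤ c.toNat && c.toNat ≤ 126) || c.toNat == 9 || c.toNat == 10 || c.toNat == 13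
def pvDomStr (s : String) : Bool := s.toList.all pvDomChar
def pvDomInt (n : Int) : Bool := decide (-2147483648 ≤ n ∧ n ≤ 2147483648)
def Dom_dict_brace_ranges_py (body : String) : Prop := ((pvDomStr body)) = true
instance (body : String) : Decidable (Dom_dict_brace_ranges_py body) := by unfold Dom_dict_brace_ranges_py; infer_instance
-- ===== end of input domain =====

-- B replaces A's single interleaved scan (explicit stack + depth + in_kstr state) by a
-- recursive-descent parser: one recursive call per brace nesting level, a helper that skips a
-- quoted string; objective: alternative decomposition, same cost.

-- ===== PORT A =====
-- A's while loop over `body`: state is (index i, depth, starts stack (head = Python list top), ranges, in_kstr).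
def aLoop : List Char → Int → Int → List Int → List (Int × Int) → Option Char → List (Int × Int)
  | [], _, _, _, ranges, _ => ranges
  | c :: rest, i, depth, starts, ranges, q =>
    if c = '\\' then
      match rest with
      | [] => ranges  -- i+1 = len: escape branch not taken; '\' matches no later branch, i += 1 ends the loop
      | _ :: rest' => aLoop rest' (i + 2) depth starts ranges q
    else
      match q with
      | some k => aLoop rest (i + 1) depth starts ranges (if c = k then none else some k)
      | none =>
        if c = '\'' ∨ c = '"' then aLoop rest (i + 1) depth starts ranges (some c)
        else if c = '{' then aLoop rest (i + 1) (depth + 1) (i :: starts) ranges q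
        else if c = '}' then
          match starts with
          | [] => aLoop rest (i + 1) (if depth > 0 then depth - 1 else depth) [] ranges q
          | s :: starts' =>
              aLoop rest (i + 1) (if depth > 0 then depth - 1 else depth) starts' (ranges ++ [(s, i + 1)]) q
        else aLoop rest (i + 1) depth starts ranges q

def dict_brace_ranges_py (body : String) : List (Int × Int) :=
  aLoop body.toList 0 0 [] [] none

-- ===== PORT B =====
-- B's skip_string: walks to just past the closing quote. Python returns the index; since Lean
-- walks a List Char, the remaining characters are returned alongside the Python index.
def bSkip : List Char → Int → Char → List Char × Int
  | [], i, _ => ([], i)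
  | c :: rest, i, k =>
    if c = '\\' then
      match rest with
      | [] => ([], i + 1)   -- trailing backslash: not an escape, not the quote; loop ends at i+1 = n
      | _ :: rest' => bSkip rest' (i + 2) k
    else if c = k then (rest, i + 1)
    else bSkip rest (i + 1) k

-- B's parse: one nesting level. Returns the accumulated ranges and `some (j, rest)` when this
-- level's closing '}' sits at index j (rest = characters after it), `none` when input ended.
-- `fuel` only makes the nested recursion structural; every call strictly shrinks the char list,
-- so fuel > length never runs out (proved in the lemmas below).
def bParse : Nat → List Char → Int → List (Int × Int) → List (Int × Int) × Option (Int × List Char)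
  | 0, _, _, out => (out, none)
  | _ + 1, [], _, out => (out, none)
  | f + 1, c :: rest, i, out =>
    if c = '\\' then
      match rest with
      | [] => (out, none)
      | _ :: rest' => bParse f rest' (i + 2) out
    else if c = '\'' ∨ c = '"' then
      let (r, j) := bSkip rest (i + 1) c
      bParse f r j out
    else if c = '{' then
      match bParse f rest (i + 1) out with
      | (out', some (j, r)) => bParse f r (j + 1) (out' ++ [(i, j + 1)])
      | (out', none) => (out', none)
    else if c = '}' then (out, some (i, rest))
    else bParse f rest (i + 1) out

-- B's top-level loop: repeated parse; an unmatched top-level '}' is skipped.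
def bTop : Nat → List Char → Int → List (Int × Int) → List (Int × Int)
  | 0, _, _, out => out
  | f + 1, cs, i, out =>
    match bParse (f + 1) cs i out with
    | (out', none) => out'
    | (out', some (j, rest)) => bTop f rest (j + 1) out'

def dict_brace_ranges_py_alt (body : String) : List (Int × Int) :=
  bTop (body.toList.length + 1) body.toList 0 []

-- ===== PRECONDITION & SPEC =====
def Spec_dict_brace_ranges_py (body : String) (out : List (Int × Int)) : Prop := out = dict_brace_ranges_py_alt body
instance (body : String) (out : List (Int × Int)) : Decidable (Spec_dict_brace_ranges_py body out) := by unfold Spec_dict_brace_ranges_py; infer_instance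

-- ===== CLAIM =====
def Claim_equal_dict_brace_ranges_py : Prop := ∀ (body : String), Dom_dict_brace_ranges_py body → Spec_dict_brace_ranges_py body (dict_brace_ranges_py body)

-- ===== LEMMAS AND PROOFS =====

-- A's depth counter never influences the returned ranges.
theorem aLoop_depth_aux :
    ∀ (n : Nat) (cs : List Char), cs.length ≤ n →
      ∀ (i depth d' : Int) (starts : List Int) (ranges : List (Int × Int)) (q : Option Char),
        aLoop cs i depth starts ranges q = aLoop cs i d' starts ranges q := by
  intro n
  induction n with
  | zero =>
      intro cs h i depth d' starts ranges q
      have : cs = [] := List.length_eq_zero_iff.mp (Nat.le_zero.mp h)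
      subst this; rfl
  | succ n ih =>
    intro cs h i depth d' starts ranges q
    cases cs with
    | nil => rfl
    | cons c rest =>
      rw [aLoop.eq_def]; conv_rhs => rw [aLoop.eq_def]
      simp only []
      by_cases hb : c = '\\'
      · simp only [hb, if_pos]
        cases rest with
        | nil => rfl
        | cons x r' => exact ih r' (by simp at h ⊢; omega) _ _ _ _ _ _
      · simp only [hb, if_neg, if_false]
        have hr : rest.length ≤ n := by simp at h; omega
        cases q with
        | some k => exact ih rest hr _ _ _ _ _ _
        | none =>
          by_cases hq : c = '\'' ∨ c = '"'
          · simp only [hq, if_pos]; exact ih rest hr _ _ _ _ _ _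
          · simp only [hq, if_neg, if_false]
            by_cases ho : c = '{'
            · simp only [ho, if_pos]; exact ih rest hr _ _ _ _ _ _
            · simp only [ho, if_neg, if_false]
              by_cases hc : c = '}'
              · simp only [hc, if_pos]
                cases starts with
                | nil => exact ih rest hr _ _ _ _ _ _
                | cons s st => exact ih rest hr _ _ _ _ _ _
              · simp only [hc, if_neg, if_false]; exact ih rest hr _ _ _ _ _ _

theorem aLoop_depth :
    ∀ (cs : List Char) (i depth : Int) (starts : List Int) (ranges : List (Int × Int))
      (q : Option Char) (d' : Int),
      aLoop cs i depth starts ranges q = aLoop cs i d' starts ranges q := by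
  intro cs i depth starts ranges q d'
  exact aLoop_depth_aux cs.length cs le_rfl i depth d' starts ranges q

theorem bSkip_len_aux : ∀ (n : Nat) (cs : List Char), cs.length ≤ n →
    ∀ (i : Int) (k : Char), (bSkip cs i k).1.length ≤ cs.length := by
  intro n
  induction n with
  | zero =>
      intro cs h i k
      have : cs = [] := List.length_eq_zero_iff.mp (Nat.le_zero.mp h)
      subst this; simp [bSkip]
  | succ n ih =>
    intro cs h i k
    cases cs with
    | nil => simp [bSkip]
    | cons c rest =>
      rw [bSkip.eq_def]
      by_cases hb : c = '\\'
      · simp only [hb, if_pos]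
        cases rest with
        | nil => simp
        | cons x r' =>
            have := ih r' (by simp at h ⊢; omega) (i + 2) k
            simp; omega
      · simp only [hb, if_false]
        by_cases hk : c = k
        · simp [hk]
        · simp only [hk, if_false]
          have := ih rest (by simp at h; omega) (i + 1) k
          simp; omega

theorem bSkip_len : ∀ (cs : List Char) (i : Int) (k : Char), (bSkip cs i k).1.length ≤ cs.length := by
  intro cs i k; exact bSkip_len_aux cs.length cs le_rfl i k

-- A inside a Koan string behaves exactly like B's skip_string followed by A outside a string.
theorem aLoop_skip_aux : ∀ (n : Nat) (cs : List Char), cs.length ≤ n →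
    ∀ (i : Int) (k : Char) (d : Int) (starts : List Int) (r : List (Int × Int)),
      aLoop cs i d starts r (some k) = aLoop (bSkip cs i k).1 (bSkip cs i k).2 d starts r none := by
  intro n
  induction n with
  | zero =>
      intro cs h i k d starts r
      have : cs = [] := List.length_eq_zero_iff.mp (Nat.le_zero.mp h)
      subst this; simp [bSkip, aLoop]
  | succ n ih =>
    intro cs h i k d starts r
    cases cs with
    | nil => simp [bSkip, aLoop]
    | cons c rest =>
      rw [aLoop.eq_def, bSkip.eq_def]
      by_cases hb : c = '\\'
      · simp only [hb, if_pos]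
        cases rest with
        | nil => simp [aLoop]
        | cons x r' => simpa using ih r' (by simp at h ⊢; omega) (i + 2) k d starts r
      · simp only [hb, if_false]
        by_cases hk : c = k
        · simp [hk]
        · simp only [hk, if_false]
          simpa [hk] using ih rest (by simp at h; omega) (i + 1) k d starts r

theorem aLoop_skip :
    ∀ (cs : List Char) (i : Int) (k : Char) (d : Int) (starts : List Int)
      (r : List (Int × Int)),
      aLoop cs i d starts r (some k) = aLoop (bSkip cs i k).1 (bSkip cs i k).2 d starts r none := by
  intro cs i k d starts r; exact aLoop_skip_aux cs.length cs le_rfl i k d starts r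

-- The main simulation: with enough fuel, one bParse level equals A's loop run with any stack,
-- up to (and including) the '}' that closes the level.
theorem bParse_main :
    ∀ (f : Nat) (cs : List Char) (i : Int) (out : List (Int × Int)),
      cs.length < f →
      (∀ o, bParse f cs i out = (o, none) →
        ∀ (d : Int) (starts : List Int), aLoop cs i d starts out none = o) ∧
      (∀ o (j : Int) (rest : List Char), bParse f cs i out = (o, some (j, rest)) →
        rest.length < cs.length ∧
        ∀ (d : Int) (starts : List Int),
          aLoop cs i d starts out none =
            match starts with
            | [] => aLoop rest (j + 1) d [] o none
            | s :: st => aLoop rest (j + 1) d st (o ++ [(s, j + 1)]) none) := by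
  intro f
  induction f with
  | zero => intro cs i out h; omega
  | succ f ih =>
    intro cs i out hlen
    cases cs with
    | nil =>
        constructor
        · intro o h; simp [bParse] at h; subst h; intro d starts; simp [aLoop]
        · intro o j rest h; simp [bParse] at h
    | cons c rest =>
      by_cases hb : c = '\\'
      · cases rest with
        | nil =>
            constructor
            · intro o h; simp [bParse, hb] at h; subst h
              intro d starts; rw [aLoop.eq_def]; simp [hb]
            · intro o j rest h; simp [bParse, hb] at h
        | cons x rest' =>
            have hlen' : rest'.length < f := by simp at hlen; omega
            have IH := ih rest' (i + 2) out hlen'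
            constructor
            · intro o h
              simp only [bParse, hb, if_pos] at h
              intro d starts
              rw [aLoop.eq_def]; simp [hb]
              exact IH.1 o h d starts
            · intro o j rst h
              simp only [bParse, hb, if_pos] at h
              have := IH.2 o j rst h
              refine ⟨by simp; omega, ?_⟩
              intro d starts
              rw [aLoop.eq_def]; simp [hb]
              exact this.2 d starts
      · by_cases hq : c = '\'' ∨ c = '"'
        · -- quote: skip the string, then recurse
          rcases hsk : bSkip rest (i + 1) c with ⟨r, jj⟩
          have hrlen : r.length ≤ rest.length := by
            have := bSkip_len rest (i + 1) c; rw [hsk] at this; simpa using this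
          have hlen' : r.length < f := by simp at hlen; omega
          have IH := ih r jj out hlen'
          have hstep : ∀ (d : Int) (starts : List Int) ,
              aLoop (c :: rest) i d starts out none = aLoop r jj d starts out none := by
            intro d starts
            rw [aLoop.eq_def]; simp [hb, hq]
            have := aLoop_skip rest (i + 1) c d starts out
            rw [hsk] at this; simpa using this
          constructor
          · intro o h
            simp only [bParse, hb, if_neg, hq, if_pos, hsk] at h
            intro d starts; rw [hstep]; exact IH.1 o h d starts
          · intro o j rst h
            simp only [bParse, hb, if_neg, hq, if_pos, hsk] at h
            have := IH.2 o j rst h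
            refine ⟨by simp; omega, ?_⟩
            intro d starts; rw [hstep]; exact this.2 d starts
        · by_cases hob : c = '{'
          · -- open brace: nested level, then continue at this level
            have hlen' : rest.length < f := by simp at hlen; omega
            have IH1 := ih rest (i + 1) out hlen'
            rcases h1 : bParse f rest (i + 1) out with ⟨out1, res1⟩
            cases res1 with
            | none =>
                constructor
                · intro o h
                  simp only [bParse, hb, hq, hob] at h
                  rw [h1] at h; simp at h
                  intro d starts
                  rw [aLoop.eq_def]; simp [hb, hq, hob]
                  rw [IH1.1 out1 h1 (d + 1) (i :: starts)]; exact h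
                · intro o j rst h
                  simp only [bParse, hb, hq, hob] at h
                  rw [h1] at h; simp at h
            | some pr =>
                rcases pr with ⟨j1, r1⟩
                have H1 := IH1.2 out1 j1 r1 h1
                have hlen2 : r1.length < f := by
                  have := H1.1; simp at hlen; omega
                have IH2 := ih r1 (j1 + 1) (out1 ++ [(i, j1 + 1)]) hlen2
                have hstep : ∀ (d : Int) (starts : List Int),
                    aLoop (c :: rest) i d starts out none =
                      aLoop r1 (j1 + 1) d starts (out1 ++ [(i, j1 + 1)]) none := by
                  intro d starts
                  rw [aLoop.eq_def]; simp [hb, hq, hob]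
                  have h2 := H1.2 (d + 1) (i :: starts)
                  simp only [] at h2
                  rw [h2]
                  exact aLoop_depth _ _ _ _ _ _ d
                constructor
                · intro o h
                  simp only [bParse, hb, hq, hob] at h
                  rw [h1] at h; simp at h
                  intro d starts
                  rw [hstep d starts]; exact IH2.1 o h d starts
                · intro o j rst h
                  simp only [bParse, hb, hq, hob] at h
                  rw [h1] at h; simp at h
                  have H2 := IH2.2 o j rst h
                  refine ⟨by have := H1.1; have := H2.1; simp; simp at this ⊢; omega, ?_⟩
                  intro d starts
                  rw [hstep d starts]; exact H2.2 d starts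
          · by_cases hcb : c = '}'
            · constructor
              · intro o h; simp [bParse, hb, hq, hob, hcb] at h
              · intro o j rst h
                simp [bParse, hb, hq, hob, hcb] at h
                obtain ⟨ho, hj, hr⟩ := h
                subst ho; subst hj; subst hr
                refine ⟨by simp, ?_⟩
                intro d starts
                rw [aLoop.eq_def]; simp [hb, hq, hob, hcb]
                cases starts with
                | nil => simp; exact aLoop_depth _ _ _ _ _ _ d
                | cons s st => simp; exact aLoop_depth _ _ _ _ _ _ d
            · -- ordinary character
              have hlen' : rest.length < f := by simp at hlen; omega
              have IH := ih rest (i + 1) out hlen'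
              constructor
              · intro o h
                simp only [bParse, hb, hq, hob, hcb, if_neg, if_false] at h
                intro d starts
                rw [aLoop.eq_def]; simp [hb, hq, hob, hcb]
                exact IH.1 o h d starts
              · intro o j rst h
                simp only [bParse, hb, hq, hob, hcb, if_neg, if_false] at h
                have := IH.2 o j rst h
                refine ⟨by simp; omega, ?_⟩
                intro d starts
                rw [aLoop.eq_def]; simp [hb, hq, hob, hcb]
                exact this.2 d starts

theorem bTop_eq :
    ∀ (f : Nat) (cs : List Char) (i : Int) (out : List (Int × Int)) (d : Int),
      cs.length < f → bTop f cs i out = aLoop cs i d [] out none := by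
  intro f
  induction f with
  | zero => intro cs i out d h; omega
  | succ f ih =>
    intro cs i out d hlen
    have M := bParse_main (f + 1) cs i out hlen
    rcases h : bParse (f + 1) cs i out with ⟨o, res⟩
    cases res with
    | none => rw [bTop, h]; exact (M.1 o h d []).symm
    | some pr =>
        rcases pr with ⟨j, rest⟩
        have H := M.2 o j rest h
        rw [bTop, h]
        have hcont : rest.length < f := by omega
        rw [H.2 d []]
        exact ih rest (j + 1) o d hcont

-- ===== VERDICT =====
theorem dict_brace_ranges_py_spec : Claim_equal_dict_brace_ranges_py := by
  intro body _
  unfold Spec_dict_brace_ranges_py dict_brace_ranges_py dict_brace_ranges_py_alt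
  exact (bTop_eq _ _ _ _ 0 (by omega)).symm
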